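-- pv_equiv track=rewrite | github.com/Jonathanseng/Number-Theory | 111. Sums of Squares Part 7.py | sums_of_squares_part7
-- ===== SOURCE A (Python) =====
-- def sums_of_squares_part7(n):
--   """Returns a list of all sums of squares from 1 to n."""
--   sums = []
--   for i in range(1, n + 1):
--     sum_of_squares = 0
--     for j in range(1, i + 1):
--       sum_of_squares += j ** 2
--     sums.append(sum_of_squares)
--   return sums
-- ===== SOURCE B (Python) =====
-- def sums_of_squares_part7(n):
--   """Returns a list of all sums of squares from 1 to n."""
--   return [i * (i + 1) * (2 * i + 1) // 6 for i in range(1, n + 1)]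
-- ===== Notes on version B (the rewrite author's own statement) =====
-- stated objective: faster
-- what changed: Replaced the quadratic nested loop (recomputing each prefix sum of squares from scratch) with the closed-form formula i*(i+1)*(2*i+1) // six per element, a single comprehension.
import Mathlib
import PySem

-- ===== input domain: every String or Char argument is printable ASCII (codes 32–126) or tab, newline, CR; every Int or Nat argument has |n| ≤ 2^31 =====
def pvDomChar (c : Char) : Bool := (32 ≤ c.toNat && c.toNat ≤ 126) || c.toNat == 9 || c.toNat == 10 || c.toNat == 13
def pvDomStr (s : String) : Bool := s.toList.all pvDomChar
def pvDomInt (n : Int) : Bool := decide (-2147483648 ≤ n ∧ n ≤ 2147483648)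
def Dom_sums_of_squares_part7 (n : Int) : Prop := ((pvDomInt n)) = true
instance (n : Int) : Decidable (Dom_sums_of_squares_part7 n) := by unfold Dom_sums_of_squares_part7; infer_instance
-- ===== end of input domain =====

-- B replaces A's quadratic nested loop with the closed-form formula i*(i+1)*(2*i+1) divided by six per element (faster, asymptotic).

-- ===== PORT A =====
def sums_of_squares_part7 (n : Int) : List Int :=
  (PySem.List.pyRange 1 (n + 1) 1).foldl
    (fun sums i =>
      sums ++ [(PySem.List.pyRange 1 (i + 1) 1).foldl (fun s j => s + j ^ 2) 0])
    []

-- ===== PORT B =====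
def sums_of_squares_part7_alt (n : Int) : List Int :=
  (PySem.List.pyRange 1 (n + 1) 1).map
    (fun i => PySem.Int.floordiv (i * (i + 1) * (2 * i + 1)) 6)

-- ===== PRECONDITION & SPEC =====
def Spec_sums_of_squares_part7 (n : Int) (out : List Int) : Prop := out = sums_of_squares_part7_alt n
instance (n : Int) (out : List Int) : Decidable (Spec_sums_of_squares_part7 n out) := by unfold Spec_sums_of_squares_part7; infer_instance

-- ===== CLAIM (what is proved, stated in full; the proofs are below) =====
def Claim_equal_sums_of_squares_part7 : Prop := ∀ (n : Int), Dom_sums_of_squares_part7 n → Spec_sums_of_squares_part7 n (sums_of_squares_part7 n)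

-- ===== LEMMAS AND PROOFS =====

/-- A's inner loop, times 6, equals the closed-form numerator (for 0 ≤ i). -/
theorem pv_inner_mul_six (i : Int) (h : 0 ≤ i) :
    6 * (PySem.List.pyRange 1 (i + 1) 1).foldl (fun s j => s + j ^ 2) 0
      = i * (i + 1) * (2 * i + 1) := by
  induction i, h using Int.le_induction with
  | base =>
      rw [PySem.List.pyRange_one_eq_nil (by norm_num)]
      simp
  | succ i hi ih =>
      rw [PySem.List.pyRange_one_succ_right (by omega), List.foldl_append]
      simp only [List.foldl]
      ring_nf
      ring_nf at ih
      linarith [ih]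

/-- A's inner loop equals B's closed form (for 0 ≤ i). -/
theorem pv_inner_eq (i : Int) (h : 0 ≤ i) :
    (PySem.List.pyRange 1 (i + 1) 1).foldl (fun s j => s + j ^ 2) 0
      = PySem.Int.floordiv (i * (i + 1) * (2 * i + 1)) 6 := by
  rw [← pv_inner_mul_six i h, PySem.Int.floordiv_eq_ediv_of_pos (by norm_num)]
  omega

/-- Appending singletons in a fold is a map. -/
theorem pv_foldl_append_map (f : Int → Int) (l : List Int) (acc : List Int) :
    l.foldl (fun sums i => sums ++ [f i]) acc = acc ++ l.map f := by
  induction l generalizing acc with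
  | nil => simp
  | cons x xs ih => simp [List.foldl, ih]

-- ===== VERDICT (by name: the statement is the Claim_ definition above) =====
theorem sums_of_squares_part7_spec : Claim_equal_sums_of_squares_part7 := by
  intro n _
  unfold Spec_sums_of_squares_part7 sums_of_squares_part7 sums_of_squares_part7_alt
  rw [pv_foldl_append_map]
  simp only [List.nil_append]
  apply List.map_congr_left
  intro i hi
  have h1 : 1 ≤ i := (PySem.List.mem_pyRange_one.mp hi).1
  exact pv_inner_eq i (by omega)
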